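-- pv_equiv track=rewrite | github.com/baojie/shiji-kb | kg/events/scripts/write_inferred_years.py | person_active_range
-- ===== SOURCE A (Python) =====
-- def person_active_range(people_list, lifespans):
--     """计算人物生卒年交集"""
--     ranges = []
--     for person in people_list:
--         if person in lifespans:
--             info = lifespans[person]
--             ranges.append((info['birth'], info['death'], person))
--     if not ranges:
--         return None, None, []
--     latest_birth = max(b for b, d, _ in ranges)
--     earliest_death = min(d for _, d, _ in ranges)
--     if latest_birth <= earliest_death:
--         return latest_birth, earliest_death, ranges
--     return None, None, ranges
-- ===== SOURCE B (Python) =====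
-- def _combine(liv, riv):
--     """Intersect two optional intervals (None = no interval)."""
--     if liv is None:
--         return riv
--     if riv is None:
--         return liv
--     return (max(liv[0], riv[0]), min(liv[1], riv[1]))
--
--
-- def person_active_range(people_list, lifespans):
--     """计算人物生卒年交集 — divide and conquer: recursively solve each half of
--     people_list and merge the two halves' (interval, ranges) results, instead of
--     a linear loop followed by max/min reduction passes."""
--     def go(people):
--         # returns (intersection interval or None, ranges) for this sublist
--         if not people:
--             return None, []
--         if len(people) == 1:
--             p = people[0]
--             if p not in lifespans:
--                 return None, []
--             info = lifespans[p]
--             return (info['birth'], info['death']), [(info['birth'], info['death'], p)]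
--         mid = len(people) // 2
--         liv, lrs = go(people[:mid])
--         riv, rrs = go(people[mid:])
--         return _combine(liv, riv), lrs + rrs
--
--     iv, ranges = go(people_list)
--     if iv is None:
--         return None, None, []
--     lb, ed = iv
--     if lb <= ed:
--         return lb, ed, ranges
--     return None, None, ranges
-- ===== Notes on version B (the rewrite author's own statement) =====
-- stated objective: alternative
-- what changed: B replaces A's forward loop plus two generator reductions with a divide-and-conquer recursion: it splits people_list in half, recursively computes each half's (intersection interval, ranges) and merges the two results, applying the <= check only at the top.
import Mathlib
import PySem

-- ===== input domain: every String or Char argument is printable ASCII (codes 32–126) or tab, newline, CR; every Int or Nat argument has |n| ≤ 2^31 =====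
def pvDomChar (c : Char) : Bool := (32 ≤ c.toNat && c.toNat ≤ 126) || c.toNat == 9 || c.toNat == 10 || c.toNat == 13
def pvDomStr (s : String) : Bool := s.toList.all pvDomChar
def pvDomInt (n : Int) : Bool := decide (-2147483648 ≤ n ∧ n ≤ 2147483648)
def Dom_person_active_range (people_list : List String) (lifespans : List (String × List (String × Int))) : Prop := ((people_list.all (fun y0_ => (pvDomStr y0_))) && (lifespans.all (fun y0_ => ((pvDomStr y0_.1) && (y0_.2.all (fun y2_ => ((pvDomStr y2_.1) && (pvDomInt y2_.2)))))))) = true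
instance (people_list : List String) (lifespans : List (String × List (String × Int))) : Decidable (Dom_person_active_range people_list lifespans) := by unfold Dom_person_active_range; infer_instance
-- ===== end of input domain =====

-- B replaces A's forward loop + two reductions by a divide-and-conquer recursion; same result, different algorithm shape.
-- Shared helper: info[k] on the inner dict (first-match assoc lookup; Pre_ guarantees the key is present wherever used).
def pvInfoVal (info : List (String × Int)) (k : String) : Int :=
  ((info.find? (fun kv => kv.1 == k)).map (fun kv => kv.2)).getD 0

-- ===== PORT A =====
def person_active_range (people_list : List String) (lifespans : List (String × List (String × Int))) : Option Int × Option Int × (List (Int × Int × String)) :=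
  let ranges := people_list.foldl (fun acc person =>
    match lifespans.find? (fun e => e.1 == person) with
    | none => acc
    | some e => acc ++ [(pvInfoVal e.2 "birth", pvInfoVal e.2 "death", person)]) []
  match ranges with
  | [] => (none, none, [])
  | x :: rs =>
    -- max(b for b, d, _ in ranges) / min(d for _, d, _ in ranges)
    let latest_birth := ((PySem.List.max? ((x :: rs).map (fun r => r.1)) (fun y => y)).getD 0)
    let earliest_death := ((PySem.List.min? ((x :: rs).map (fun r => r.2.1)) (fun y => y)).getD 0)
    if latest_birth ≤ earliest_death then (some latest_birth, some earliest_death, x :: rs)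
    else (none, none, x :: rs)

-- ===== PORT B =====
-- interval merge of Source B's if/elif chain
def parCombine (liv riv : Option (Int × Int)) : Option (Int × Int) :=
  match liv, riv with
  | none, riv => riv
  | some liv, none => some liv
  | some liv, some riv => some (max liv.1 riv.1, min liv.2 riv.2)

-- recursive divide-and-conquer helper 'go' of Source B
def parGo (lifespans : List (String × List (String × Int))) : List String → Option (Int × Int) × List (Int × Int × String)
  | [] => (none, [])
  | [p] =>
    match lifespans.find? (fun e => e.1 == p) with
    | none => (none, [])
    | some e =>
      (some (pvInfoVal e.2 "birth", pvInfoVal e.2 "death"),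
       [(pvInfoVal e.2 "birth", pvInfoVal e.2 "death", p)])
  | p :: q :: rest =>
    match parGo lifespans ((p :: q :: rest).take ((p :: q :: rest).length / 2)),
          parGo lifespans ((p :: q :: rest).drop ((p :: q :: rest).length / 2)) with
    | (liv, lrs), (riv, rrs) => (parCombine liv riv, lrs ++ rrs)
  termination_by xs => xs.length
  decreasing_by
  · simp [List.length_take]; omega
  · simp [List.length_drop]; omega

def person_active_range_alt (people_list : List String) (lifespans : List (String × List (String × Int))) : Option Int × Option Int × (List (Int × Int × String)) :=
  match parGo lifespans people_list with
  | (none, _) => (none, none, [])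
  | (some (lb, ed), ranges) =>
    if lb ≤ ed then (some lb, some ed, ranges) else (none, none, ranges)

-- ===== PRECONDITION & SPEC =====
-- Pre_ excludes exactly the inputs where Python A raises KeyError: a person of people_list whose
-- (first-matching) lifespans entry lacks a "birth" or "death" key.
def Pre_person_active_range (people_list : List String) (lifespans : List (String × List (String × Int))) : Prop :=
  ∀ p ∈ people_list, ∀ e ∈ (lifespans.find? (fun e => e.1 == p)).toList,
    (e.2.any (fun kv => kv.1 == "birth")) = true ∧ (e.2.any (fun kv => kv.1 == "death")) = true
instance (people_list : List String) (lifespans : List (String × List (String × Int))) : Decidable (Pre_person_active_range people_list lifespans) := by unfold Pre_person_active_range; infer_instance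

def pvWitness_person_active_range : List String × (List (String × List (String × Int))) :=
  (["alice", "bob"], [("alice", [("birth", 10), ("death", 40)]), ("bob", [("birth", 20), ("death", 50)])])

def Spec_person_active_range (people_list : List String) (lifespans : List (String × List (String × Int))) (out : Option Int × Option Int × (List (Int × Int × String))) : Prop := out = person_active_range_alt people_list lifespans
instance (people_list : List String) (lifespans : List (String × List (String × Int))) (out : Option Int × Option Int × (List (Int × Int × String))) : Decidable (Spec_person_active_range people_list lifespans out) := by unfold Spec_person_active_range; infer_instance

-- ===== CLAIM =====
def Claim_equal_person_active_range : Prop := ∀ (people_list : List String) (lifespans : List (String × List (String × Int))), Dom_person_active_range people_list lifespans → Pre_person_active_range people_list lifespans → Spec_person_active_range people_list lifespans (person_active_range people_list lifespans)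

-- ===== LEMMAS AND PROOFS =====

-- the flat list of matched ranges, in people_list order
def pvRanges (ls : List (String × List (String × Int))) (pl : List String) : List (Int × Int × String) :=
  pl.flatMap (fun p =>
    match ls.find? (fun e => e.1 == p) with
    | none => []
    | some e => [(pvInfoVal e.2 "birth", pvInfoVal e.2 "death", p)])

-- intersection interval of a list of ranges, combined front-to-back
def pvIv : List (Int × Int × String) → Option (Int × Int)
  | [] => none
  | r :: rs => parCombine (some (r.1, r.2.1)) (pvIv rs)

theorem parCombine_assoc (a b c : Option (Int × Int)) :
    parCombine (parCombine a b) c = parCombine a (parCombine b c) := by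
  cases a <;> cases b <;> cases c <;>
    simp [parCombine, max_assoc, min_assoc]

theorem pvIv_append (a b : List (Int × Int × String)) :
    pvIv (a ++ b) = parCombine (pvIv a) (pvIv b) := by
  induction a with
  | nil =>
    simp only [List.nil_append, pvIv]
    cases pvIv b <;> rfl
  | cons x xs ih =>
    simp only [List.cons_append, pvIv]
    rw [ih, ← parCombine_assoc]

theorem pvRanges_append (ls : List (String × List (String × Int))) (a b : List String) :
    pvRanges ls (a ++ b) = pvRanges ls a ++ pvRanges ls b := by
  simp [pvRanges]

-- A's foldl-built ranges list is pvRanges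
theorem pvRanges_foldl (ls : List (String × List (String × Int))) (pl : List String)
    (r : List (Int × Int × String)) :
    pl.foldl (fun acc person =>
      match ls.find? (fun e => e.1 == person) with
      | none => acc
      | some e => acc ++ [(pvInfoVal e.2 "birth", pvInfoVal e.2 "death", person)]) r
    = r ++ pvRanges ls pl := by
  induction pl generalizing r with
  | nil => simp [pvRanges]
  | cons p pl ih =>
    simp only [List.foldl_cons]
    cases h : ls.find? (fun e => e.1 == p) with
    | none => simp [h, ih, pvRanges]
    | some e => simp [h, ih, pvRanges]

-- B's recursion computes (pvIv of the ranges, the ranges)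
theorem parGo_eq (ls : List (String × List (String × Int))) (pl : List String) :
    parGo ls pl = (pvIv (pvRanges ls pl), pvRanges ls pl) := by
  fun_induction parGo ls pl
  case case1 => simp [pvRanges, pvIv]
  case case2 =>
    rename_i p h
    simp [pvRanges, pvIv, h]
  case case3 =>
    rename_i p e h
    simp [pvRanges, pvIv, h, parCombine]
  case case4 =>
    rename_i p q rest liv lrs riv rrs hdrop htake ih1 ih2
    rw [ih1] at htake
    rw [ih2] at hdrop
    injection htake with hliv hlrs
    injection hdrop with hriv hrrs
    subst hliv hlrs hriv hrrs
    rw [show pvRanges ls (p :: q :: rest)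
          = pvRanges ls ((p :: q :: rest).take ((p :: q :: rest).length / 2))
            ++ pvRanges ls ((p :: q :: rest).drop ((p :: q :: rest).length / 2)) from
        by rw [← pvRanges_append, List.take_append_drop],
      pvIv_append]

-- hoisting running max/min out of a foldl
theorem pv_max_hoist (l : List (Int × Int × String)) (a b : Int) :
    max a (l.foldl (fun m r => max m r.1) b) = l.foldl (fun m r => max m r.1) (max a b) := by
  induction l generalizing b with
  | nil => simp
  | cons x xs ih => simp only [List.foldl_cons]; rw [ih, max_assoc]

theorem pv_min_hoist (l : List (Int × Int × String)) (a b : Int) :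
    min a (l.foldl (fun m r => min m r.2.1) b) = l.foldl (fun m r => min m r.2.1) (min a b) := by
  induction l generalizing b with
  | nil => simp
  | cons x xs ih => simp only [List.foldl_cons]; rw [ih, min_assoc]

-- pvIv of a nonempty list is the running-max birth and running-min death
theorem pvIv_cons (x : Int × Int × String) (rs : List (Int × Int × String)) :
    pvIv (x :: rs) = some (rs.foldl (fun m r => max m r.1) x.1,
                           rs.foldl (fun m r => min m r.2.1) x.2.1) := by
  induction rs generalizing x with
  | nil => simp [pvIv, parCombine]
  | cons y ys ih =>
    show parCombine (some (x.1, x.2.1)) (pvIv (y :: ys)) = _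
    rw [ih y]
    simp only [parCombine, List.foldl_cons]
    rw [pv_max_hoist, pv_min_hoist]

-- ===== VERDICT =====
theorem person_active_range_spec : Claim_equal_person_active_range := by
  intro pl ls _ _
  unfold Spec_person_active_range person_active_range person_active_range_alt
  rw [pvRanges_foldl, parGo_eq]
  simp only [List.nil_append]
  cases h : pvRanges ls pl with
  | nil => simp [pvIv]
  | cons x rs =>
    rw [pvIv_cons]
    simp [PySem.List.max?_id_cons, PySem.List.min?_id_cons, List.foldl_map]
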